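-- pv_equiv track=rewrite | github.com/oskin1/kb | scripts/cluster.py | stabilize_ids
-- ===== SOURCE A (Python) =====
-- from collections import Counter, defaultdict
--
-- def stabilize_ids(assignments: dict[str, int]) -> dict[str, int]:
--     """Renumber community IDs by descending community size (0 = largest)."""
--     communities = defaultdict(list)
--     for node, cid in assignments.items():
--         communities[cid].append(node)
--
--     sorted_comms = sorted(communities.values(), key=len, reverse=True)
--     node_to_new = {}
--     for new_id, nodes in enumerate(sorted_comms):
--         for n in nodes:
--             node_to_new[n] = new_id
--     return node_to_new
-- ===== SOURCE B (Python) =====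
-- def stabilize_ids(assignments: dict[str, int]) -> dict[str, int]:
--     """Renumber community IDs by descending community size (0 = largest)."""
--     groups = {}
--     for node, cid in assignments.items():
--         groups.setdefault(cid, []).append(node)
--     out = {}
--     new_id = 0
--     for size in range(len(assignments), 0, -1):
--         for nodes in groups.values():
--             if len(nodes) == size:
--                 for n in nodes:
--                     out[n] = new_id
--                 new_id += 1
--     return out
-- ===== Notes on version B (the rewrite author's own statement) =====
-- stated objective: alternative
-- what changed: B replaces A's comparison sort of the grouped node lists by a sort-free counting-style selection: one pass per candidate size from len(assignments) down to 1, numbering the groups of exactly that size in first-seen order.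
import Mathlib
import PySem

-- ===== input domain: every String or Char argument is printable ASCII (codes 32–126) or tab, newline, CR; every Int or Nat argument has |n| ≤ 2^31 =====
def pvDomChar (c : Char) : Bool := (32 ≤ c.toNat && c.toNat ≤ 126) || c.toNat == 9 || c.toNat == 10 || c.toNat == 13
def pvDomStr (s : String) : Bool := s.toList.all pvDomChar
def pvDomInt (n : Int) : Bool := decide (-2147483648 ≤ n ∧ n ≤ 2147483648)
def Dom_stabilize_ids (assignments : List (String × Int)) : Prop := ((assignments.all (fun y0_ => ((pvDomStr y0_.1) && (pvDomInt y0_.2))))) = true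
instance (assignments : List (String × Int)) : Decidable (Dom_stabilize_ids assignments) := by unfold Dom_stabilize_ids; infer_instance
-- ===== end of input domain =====

-- B renumbers communities without any sort call: after grouping, it makes one pass per
-- candidate size from len(assignments) down to 1 and numbers the groups of that exact size
-- in first-seen order (a counting-sort-style selection), instead of A's comparison sort of
-- the group lists by length (objective: alternative).

-- ===== PORT A =====
def stabilize_ids (assignments : List (String × Int)) : List (String × Int) :=
  -- communities = defaultdict(list); for node, cid: communities[cid].append(node)
  let communities : PySem.Dict Int (List String) :=
    assignments.foldl (fun d p => d.modify p.2 [] (· ++ [p.1])) PySem.Dict.empty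
  -- sorted_comms = sorted(communities.values(), key=len, reverse=True)
  let sorted_comms := PySem.List.sorted communities.values (fun nodes => nodes.length) true
  -- node_to_new = {}; for new_id, nodes in enumerate(sorted_comms): for n in nodes: node_to_new[n] = new_id
  let node_to_new : PySem.Dict String Int :=
    (PySem.List.enumerate sorted_comms).foldl
      (fun d pair => pair.2.foldl (fun d n => d.insert n pair.1) d) PySem.Dict.empty
  node_to_new.items

-- ===== PORT B =====
def stabilize_ids_alt (assignments : List (String × Int)) : List (String × Int) :=
  -- groups = {}; for node, cid: groups.setdefault(cid, []).append(node)
  let groups : PySem.Dict Int (List String) :=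
    assignments.foldl (fun d p => d.modify p.2 [] (· ++ [p.1])) PySem.Dict.empty
  -- out = {}; new_id = 0
  -- for size in range(len(assignments), 0, -1):
  --   for nodes in groups.values():
  --     if len(nodes) == size:
  --       for n in nodes: out[n] = new_id
  --       new_id += 1
  let st : PySem.Dict String Int × Int :=
    (PySem.List.pyRange (assignments.length : Int) 0 (-1)).foldl
      (fun st size =>
        groups.values.foldl
          (fun st nodes =>
            if ((nodes.length : Int) == size) then
              (nodes.foldl (fun d n => d.insert n st.2) st.1, st.2 + 1)
            else st)
          st)
      (PySem.Dict.empty, 0)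
  st.1.items

-- ===== PRECONDITION & SPEC =====
def Spec_stabilize_ids (assignments : List (String × Int)) (out : List (String × Int)) : Prop := out = stabilize_ids_alt assignments
instance (assignments : List (String × Int)) (out : List (String × Int)) : Decidable (Spec_stabilize_ids assignments out) := by unfold Spec_stabilize_ids; infer_instance

-- ===== CLAIM (what is proved, stated in full; the proofs are below) =====
def Claim_equal_stabilize_ids : Prop := ∀ (assignments : List (String × Int)), Dom_stabilize_ids assignments → Spec_stabilize_ids assignments (stabilize_ids assignments)

-- ===== LEMMAS AND PROOFS =====

theorem pv_insertBy_skip {α : Type} (bef : α → α → Bool) (x : α) (p r : List α)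
    (h : ∀ b ∈ p, bef x b = false) :
    PySem.List.insertBy bef x (p ++ r) = p ++ PySem.List.insertBy bef x r := by
  induction p with
  | nil => rfl
  | cons y t ih =>
      have hy : bef x y = false := h y (by simp)
      simp only [List.cons_append, PySem.List.insertBy, hy, Bool.false_eq_true, if_false]
      rw [ih (fun b hb => h b (by simp [hb]))]

theorem pv_insertBy_front {α : Type} (bef : α → α → Bool) (x : α) (r : List α)
    (h : ∀ b ∈ r, bef x b = true) :
    PySem.List.insertBy bef x r = x :: r := by
  cases r with
  | nil => rfl
  | cons y t => simp [PySem.List.insertBy, h y (by simp)]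

-- a reverse-stable insertion into a list grouped by a strictly DECREASING chain of key
-- values appends the element to the end of its own group
theorem pv_insert_grouped_rev {α : Type} (key : α → Int) (l : List Int) (x : α)
    (G : Int → List α)
    (hchain : l.Pairwise (fun c c' => c' < c)) (hmem : key x ∈ l)
    (hG : ∀ c ∈ l, ∀ b ∈ G c, key b = c) :
    PySem.List.insertBy (fun a b => decide (key b < key a)) x (l.flatMap G)
      = l.flatMap (fun c => G c ++ if key x == c then [x] else []) := by
  induction l with
  | nil => simp at hmem
  | cons c t ih =>
      rcases List.pairwise_cons.mp hchain with ⟨hhead, htail⟩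
      by_cases hc : key x = c
      · -- x belongs to the first group
        have hskip : ∀ b ∈ G c, (fun a b => decide (key b < key a)) x b = false := by
          intro b hb
          have := hG c (by simp) b hb
          simp [this, hc]
        have hfront : ∀ b ∈ t.flatMap G, (fun a b => decide (key b < key a)) x b = true := by
          intro b hb
          rcases List.mem_flatMap.mp hb with ⟨c', hc', hbG⟩
          have hb2 : key b = c' := hG c' (by simp [hc']) b hbG
          simp only [decide_eq_true_eq, hb2, hc]
          exact hhead c' hc'
        rw [List.flatMap_cons, pv_insertBy_skip _ _ _ _ hskip, pv_insertBy_front _ _ _ hfront]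
        have hrest : t.flatMap (fun c' => G c' ++ if key x == c' then [x] else [])
            = t.flatMap G := by
          apply List.flatMap_congr
          intro c' hc'
          have : key x ≠ c' := by
            intro he
            have := hhead c' hc'
            rw [hc] at he; rw [he] at this; exact lt_irrefl _ this
          simp [this]
        have hif : (key x == c) = true := by simp [hc]
        rw [show ((c :: t).flatMap (fun c' => G c' ++ if key x == c' then [x] else []))
            = (G c ++ [x]) ++ t.flatMap (fun c' => G c' ++ if key x == c' then [x] else [])
          from by rw [List.flatMap_cons, hif]; simp, hrest]
        simp
      · -- x belongs to a later group
        have hmem' : key x ∈ t := by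
          rcases List.mem_cons.mp hmem with h | h
          · exact absurd h hc
          · exact h
        have hskip : ∀ b ∈ G c, (fun a b => decide (key b < key a)) x b = false := by
          intro b hb
          have hb2 : key b = c := hG c (by simp) b hb
          have hlt : key x < c := hhead _ hmem'
          simp only [decide_eq_false_iff_not, hb2, not_lt]
          exact le_of_lt hlt
        rw [List.flatMap_cons, pv_insertBy_skip _ _ _ _ hskip]
        have hne : (key x == c) = false := by simp [hc]
        rw [List.flatMap_cons, hne]
        simp only [Bool.false_eq_true, if_false, List.append_nil]
        congr 1
        exact ih htail hmem' (fun c' hc' b hb => hG c' (by simp [hc']) b hb)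

-- the stable reverse sort by an Int key is the concatenation, along any strictly
-- decreasing chain covering all key values, of the equal-key sublists in list order
theorem pv_sorted_rev_grouped {α : Type} (l : List Int) (key : α → Int)
    (hchain : l.Pairwise (fun c c' => c' < c))
    (xs : List α) (hx : ∀ x ∈ xs, key x ∈ l) :
    PySem.List.sorted xs key true
      = l.flatMap (fun c => xs.filter (fun x => key x == c)) := by
  rw [PySem.List.sorted_rev_eq_foldl_insertBy]
  have aux : ∀ (ys pref : List α), (∀ x ∈ ys, key x ∈ l) →
      ys.foldl (fun acc x => PySem.List.insertBy
          (fun a b => decide (key b < key a)) x acc)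
        (l.flatMap (fun c => pref.filter (fun x => key x == c)))
      = l.flatMap (fun c => (pref ++ ys).filter (fun x => key x == c)) := by
    intro ys
    induction ys with
    | nil => intro pref _; simp
    | cons x t ih =>
        intro pref hys
        simp only [List.foldl_cons]
        rw [pv_insert_grouped_rev key l x _ hchain (hys x (by simp))
          (fun c _ b hb => by
            have := List.mem_filter.mp hb
            exact eq_of_beq this.2)]
        have hstep : (fun c => (pref.filter (fun x => key x == c)) ++ if key x == c then [x] else [])
            = fun c => (pref ++ [x]).filter (fun y => key y == c) := by
          funext c
          by_cases h : key x = c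
          · simp [List.filter_append, List.filter, h]
          · have hbf : (key x == c) = false := by simpa using h
            simp [List.filter_append, List.filter, hbf]
        rw [hstep, ih (pref ++ [x]) (fun y hy => hys y (by simp [hy]))]
        simp
  have := aux xs [] hx
  rw [show l.flatMap (fun c => List.filter (fun x => key x == c) ([] : List α)) = []
    from by induction l <;> simp [*]] at this
  simpa using this

-- sorted depends on the key only through <-comparisons between members of the list
theorem pv_sorted_congr_mem {α κ₁ κ₂ : Type} [LT κ₁] [DecidableLT κ₁] [LT κ₂] [DecidableLT κ₂]
    (l : List α) (key₁ : α → κ₁) (key₂ : α → κ₂) (rev : Bool)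
    (h : ∀ a ∈ l, ∀ b ∈ l, (key₁ a < key₁ b ↔ key₂ a < key₂ b)) :
    PySem.List.sorted l key₁ rev = PySem.List.sorted l key₂ rev := by
  have hins : ∀ (bef₁ bef₂ : α → α → Bool) (x : α) (ys : List α),
      (∀ b ∈ ys, bef₁ x b = bef₂ x b) →
      PySem.List.insertBy bef₁ x ys = PySem.List.insertBy bef₂ x ys := by
    intro bef₁ bef₂ x ys
    induction ys with
    | nil => intro _; rfl
    | cons y t ih =>
        intro hb
        simp only [PySem.List.insertBy]
        rw [hb y (by simp)]
        by_cases hy : bef₂ x y = true <;>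
          simp [hy, ih (fun b hb' => hb b (by simp [hb']))]
  have aux : ∀ (bef₁ bef₂ : α → α → Bool),
      (∀ a ∈ l, ∀ b ∈ l, bef₁ a b = bef₂ a b) →
      ∀ (l' acc : List α), (∀ x ∈ l', x ∈ l) → (∀ x ∈ acc, x ∈ l) →
      l'.foldl (fun acc x => PySem.List.insertBy bef₁ x acc) acc
        = l'.foldl (fun acc x => PySem.List.insertBy bef₂ x acc) acc := by
    intro bef₁ bef₂ hb l'
    induction l' with
    | nil => intro acc _ _; rfl
    | cons x t ih =>
        intro acc hl' hacc
        have hx : x ∈ l := hl' x (by simp)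
        have h1 : PySem.List.insertBy bef₁ x acc = PySem.List.insertBy bef₂ x acc :=
          hins _ _ _ _ (fun b hbm => hb x hx b (hacc b hbm))
        simp only [List.foldl_cons, h1]
        exact ih _ (fun y hy => hl' y (by simp [hy]))
          (fun y hy => by
            rcases (PySem.List.mem_insertBy _ _ _ _).mp hy with h | h
            · exact h ▸ hx
            · exact hacc y h)
  cases rev with
  | false =>
      rw [PySem.List.sorted_eq_foldl_insertBy, PySem.List.sorted_eq_foldl_insertBy]
      exact aux _ _ (fun a ha b hb => by
        simp only [decide_eq_decide]; exact h a ha b hb) l [] (fun _ hx => hx) (by simp)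
  | true =>
      rw [PySem.List.sorted_rev_eq_foldl_insertBy, PySem.List.sorted_rev_eq_foldl_insertBy]
      exact aux _ _ (fun a ha b hb => by
        simp only [decide_eq_decide]; exact h b hb a ha) l [] (fun _ hx => hx) (by simp)

-- B's numbering loop with an explicit new_id counter IS A's enumerate loop
theorem pv_counter_fold (L : List (List String)) :
    ∀ (d : PySem.Dict String Int) (s : Int),
      L.foldl (fun st nodes =>
          (nodes.foldl (fun d n => d.insert n st.2) st.1, st.2 + 1)) (d, s)
        = ((PySem.List.enumerate L s).foldl
            (fun d pair => pair.2.foldl (fun d n => d.insert n pair.1) d) d,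
           s + (L.length : Int)) := by
  induction L with
  | nil => intro d s; simp [PySem.List.enumerate]
  | cons nodes t ih =>
      intro d s
      simp only [List.foldl_cons, PySem.List.enumerate, ih, List.length_cons]
      rw [Prod.mk.injEq]
      refine ⟨rfl, by push_cast; ring⟩

theorem stabilize_ids_eq (xs : List (String × Int)) :
    stabilize_ids xs = stabilize_ids_alt xs := by
  simp only [stabilize_ids, stabilize_ids_alt]
  set communities := xs.foldl (fun d p => d.modify p.2 [] (· ++ [p.1]))
    (PySem.Dict.empty : PySem.Dict Int (List String)) with hcommunities
  set sizes := PySem.List.pyRange (xs.length : Int) 0 (-1) with hsizes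
  -- B's guarded inner loop is a loop over the filtered value list
  have hguard : (fun (st : PySem.Dict String Int × Int) (size : Int) =>
      communities.values.foldl
        (fun st nodes =>
          if ((nodes.length : Int) == size) then
            (nodes.foldl (fun d n => d.insert n st.2) st.1, st.2 + 1)
          else st) st)
      = fun st size =>
        (communities.values.filter (fun nodes => (nodes.length : Int) == size)).foldl
          (fun st nodes => (nodes.foldl (fun d n => d.insert n st.2) st.1, st.2 + 1)) st := by
    funext st size
    exact PySem.List.foldl_if_eq_foldl_filter _ _ _ _
  rw [hguard, ← List.foldl_flatMap]
  -- B's selection order, a list of node lists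
  set sel := sizes.flatMap
    (fun size => communities.values.filter (fun nodes => (nodes.length : Int) == size))
    with hsel
  rw [pv_counter_fold sel PySem.Dict.empty 0]
  -- it remains to show A's stable sort produces exactly sel
  have hknodup : communities.keys.Nodup := by
    rw [hcommunities, PySem.Dict.keys_foldl_modify_key xs (fun p => p.2) [] _ PySem.Dict.empty]
    exact PySem.Set.nodup_ofList (xs.map (fun p => p.2))
  have hgetD : ∀ c, communities.getD c [] = (xs.filter (fun p => p.2 == c)).map (fun p => p.1) := by
    intro c
    rw [hcommunities, show (xs.foldl (fun d p => d.modify p.2 [] (· ++ [p.1]))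
        (PySem.Dict.empty : PySem.Dict Int (List String)))
      = (xs.map (fun p => (p.2, p.1))).foldl
          (fun d q => d.modify q.1 [] (· ++ [q.2])) PySem.Dict.empty from by
        rw [List.foldl_map]]
    rw [PySem.Dict.getD_foldl_modify_append]
    simp [List.filter_map, Function.comp_def, List.map_map]
  -- every value list is nonempty and no longer than xs
  have hlen : ∀ v ∈ communities.values, 0 < v.length ∧ v.length ≤ xs.length := by
    intro v hv
    rw [PySem.Dict.values_eq_map_keys communities hknodup []] at hv
    rcases List.mem_map.mp hv with ⟨c, hc, rfl⟩
    rw [hgetD c]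
    constructor
    · rw [hcommunities, PySem.Dict.keys_foldl_modify_key xs (fun p => p.2) [] _ PySem.Dict.empty] at hc
      have hc' : c ∈ xs.map (fun p => p.2) := by
        rw [show PySem.Set.update (PySem.Dict.keys PySem.Dict.empty) (xs.map (fun p => p.2))
            = PySem.Set.ofList (xs.map (fun p => p.2)) from rfl] at hc
        exact (PySem.Set.mem_ofList _ _).mp hc
      rcases List.mem_map.mp hc' with ⟨p, hp, hp2⟩
      have : p ∈ xs.filter (fun q => q.2 == c) := List.mem_filter.mpr ⟨hp, by simp [hp2]⟩
      have hne : xs.filter (fun q => q.2 == c) ≠ [] := List.ne_nil_of_mem this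
      simpa [List.length_pos_iff, List.map_eq_nil_iff] using hne
    · calc ((xs.filter (fun p => p.2 == c)).map (fun p => p.1)).length
          = (xs.filter (fun p => p.2 == c)).length := List.length_map ..
        _ ≤ xs.length := List.length_filter_le _ _
  have hchain : sizes.Pairwise (fun c c' => c' < c) := by
    rw [hsizes, PySem.List.pyRange_neg_one_eq_reverse, List.pairwise_reverse]
    exact PySem.List.pairwise_lt_pyRange_one _ _
  have hx : ∀ v ∈ communities.values, ((v.length : Int)) ∈ sizes := by
    intro v hv
    rw [hsizes, PySem.List.mem_pyRange_neg_one]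
    have := hlen v hv
    omega
  have hskey : PySem.List.sorted communities.values (fun nodes => nodes.length) true
      = PySem.List.sorted communities.values (fun nodes => (nodes.length : Int)) true :=
    pv_sorted_congr_mem _ _ _ _ (fun a _ b _ => by exact_mod_cast Iff.rfl)
  rw [hskey, pv_sorted_rev_grouped sizes (fun nodes => (nodes.length : Int)) hchain
    communities.values hx]

-- ===== VERDICT (by name: the statement is the Claim_ definition above) =====
theorem stabilize_ids_spec : Claim_equal_stabilize_ids := by
  intro assignments _
  unfold Spec_stabilize_ids
  exact stabilize_ids_eq assignments
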